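-- pv_equiv track=rewrite | github.com/alicesilva/P1-Python-Problemas | toppl.py | filtra_alunos
-- ===== SOURCE A (Python) =====
-- def filtra_alunos(alunos, inscritos, media):
-- 	cont1 = 0
-- 	for i in range(len(alunos)-1,-1,-1):
-- 		cont = 0
-- 		for j in range(len(inscritos)):
-- 			if alunos[i][0] != inscritos[j]:
-- 				cont += 1
-- 		if cont == len(inscritos):
-- 			alunos.pop(i)
-- 			cont1 += 1
-- 	for i in range(len(alunos)-1,-1,-1):
-- 		if alunos[i][1] < media:
-- 			alunos.pop(i)
-- 			cont1 += 1
--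
-- 	return cont1
-- ===== SOURCE B (Python) =====
-- def filtra_alunos(alunos, inscritos, media):
--     novos = [a for a in alunos if a[0] in inscritos and a[1] >= media]
--     removidos = len(alunos) - len(novos)
--     alunos[:] = novos
--     return removidos
-- ===== Notes on version B (the rewrite author's own statement) =====
-- stated objective: simpler
-- what changed: A's two backward pop-loops (the first with an inner counting scan of inscritos, each pop an O(n) shift) are replaced by a single forward comprehension with a combined keep-predicate; the removal count becomes the length difference and the list is mutated once by slice assignment.
import Mathlib
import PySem

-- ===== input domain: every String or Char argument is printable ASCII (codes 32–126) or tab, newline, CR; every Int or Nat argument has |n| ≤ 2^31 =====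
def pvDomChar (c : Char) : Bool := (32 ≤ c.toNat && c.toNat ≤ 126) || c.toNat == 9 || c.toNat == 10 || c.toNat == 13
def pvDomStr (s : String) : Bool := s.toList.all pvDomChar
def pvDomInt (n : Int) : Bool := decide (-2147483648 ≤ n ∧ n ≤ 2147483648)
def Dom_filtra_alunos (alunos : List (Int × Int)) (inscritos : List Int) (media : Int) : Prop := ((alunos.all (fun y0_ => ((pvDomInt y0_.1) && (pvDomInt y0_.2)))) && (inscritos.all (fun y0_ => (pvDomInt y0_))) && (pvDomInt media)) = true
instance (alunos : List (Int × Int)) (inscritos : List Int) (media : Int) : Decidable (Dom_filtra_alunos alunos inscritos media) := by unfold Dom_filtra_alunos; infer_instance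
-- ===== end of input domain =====

-- ===== PORT A =====
-- A mutates `alunos` in place (pop); equivalence here is about the RETURN value;
-- B performs the same net mutation via slice assignment (same final contents).
-- inner loop: cont = number of j with alunos[i][0] != inscritos[j]
def contNe (x : Int) (ins : List Int) : Nat :=
  ins.foldl (fun c j => if x ≠ j then c + 1 else c) 0

-- first backward pop-loop: indices processed from high to low, so index 0 last
def pass1 (alunos : List (Int × Int)) (ins : List Int) : List (Int × Int) × Int :=
  match alunos with
  | [] => ([], 0)
  | a :: xs =>
    let r := pass1 xs ins
    if contNe a.1 ins = ins.length then (r.1, r.2 + 1) else (a :: r.1, r.2)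

-- second backward pop-loop
def pass2 (alunos : List (Int × Int)) (media : Int) : List (Int × Int) × Int :=
  match alunos with
  | [] => ([], 0)
  | a :: xs =>
    let r := pass2 xs media
    if a.2 < media then (r.1, r.2 + 1) else (a :: r.1, r.2)

def filtra_alunos (alunos : List (Int × Int)) (inscritos : List Int) (media : Int) : Int :=
  (pass1 alunos inscritos).2 + (pass2 (pass1 alunos inscritos).1 media).2

-- ===== PORT B =====
def filtra_alunos_alt (alunos : List (Int × Int)) (inscritos : List Int) (media : Int) : Int :=
  (alunos.length : Int)
    - ((alunos.filter (fun a => inscritos.contains a.1 && decide (media ≤ a.2))).length : Int)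

-- ===== PRECONDITION & SPEC =====
def Spec_filtra_alunos (alunos : List (Int × Int)) (inscritos : List Int) (media : Int) (out : Int) : Prop := out = filtra_alunos_alt alunos inscritos media
instance (alunos : List (Int × Int)) (inscritos : List Int) (media : Int) (out : Int) : Decidable (Spec_filtra_alunos alunos inscritos media out) := by unfold Spec_filtra_alunos; infer_instance

-- ===== CLAIM (what is proved, stated in full; the proofs are below) =====
def Claim_equal_filtra_alunos : Prop := ∀ (alunos : List (Int × Int)) (inscritos : List Int) (media : Int), Dom_filtra_alunos alunos inscritos media → Spec_filtra_alunos alunos inscritos media (filtra_alunos alunos inscritos media)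

-- ===== LEMMAS AND PROOFS =====
theorem contNe_foldl_acc (x : Int) (ins : List Int) (c : Nat) :
    ins.foldl (fun c j => if x ≠ j then c + 1 else c) c
      = c + ins.foldl (fun c j => if x ≠ j then c + 1 else c) 0 := by
  induction ins generalizing c with
  | nil => simp
  | cons a l ih =>
    simp only [List.foldl]
    rw [ih, ih (if x ≠ a then 0 + 1 else 0)]
    split <;> omega

theorem contNe_le (x : Int) (ins : List Int) : contNe x ins ≤ ins.length := by
  induction ins with
  | nil => simp [contNe]
  | cons a l ih =>
    unfold contNe at ih ⊢
    simp only [List.foldl, List.length_cons]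
    rw [contNe_foldl_acc]
    split <;> omega

theorem contNe_eq_iff (x : Int) (ins : List Int) :
    contNe x ins = ins.length ↔ ins.contains x = false := by
  induction ins with
  | nil => simp [contNe]
  | cons a l ih =>
    unfold contNe at ih ⊢
    simp only [List.foldl, List.length_cons, List.contains_cons]
    rw [contNe_foldl_acc]
    by_cases hxa : x = a
    · subst hxa
      rw [if_neg (by simp)]
      have hle := contNe_le x l
      unfold contNe at hle
      constructor
      · intro h; exfalso; omega
      · intro h; simp at h
    · rw [if_pos hxa]
      have hb : (x == a) = false := by simp [hxa]
      rw [hb, Bool.false_or, ← ih]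
      omega

theorem pass1_spec (xs : List (Int × Int)) (ins : List Int) :
    pass1 xs ins
      = (xs.filter (fun a => ins.contains a.1),
         (xs.length : Int) - ((xs.filter (fun a => ins.contains a.1)).length : Int)) := by
  induction xs with
  | nil => simp [pass1]
  | cons a l ih =>
    by_cases h : contNe a.1 ins = ins.length
    · have hc : ins.contains a.1 = false := (contNe_eq_iff _ _).1 h
      simp only [pass1, ih, h, if_true]
      rw [List.filter_cons_of_neg (by simpa using hc)]
      exact Prod.ext rfl (by push_cast [List.length_cons]; ring)
    · have hc : ins.contains a.1 = true := by
        cases h' : ins.contains a.1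
        · exact absurd ((contNe_eq_iff _ _).2 h') h
        · rfl
      simp only [pass1, ih, h, if_false]
      rw [List.filter_cons_of_pos (by simpa using hc)]
      exact Prod.ext rfl (by push_cast [List.length_cons]; ring)

theorem pass2_spec (xs : List (Int × Int)) (media : Int) :
    pass2 xs media
      = (xs.filter (fun a => decide (media ≤ a.2)),
         (xs.length : Int) - ((xs.filter (fun a => decide (media ≤ a.2))).length : Int)) := by
  induction xs with
  | cons a l ih =>
    by_cases h : a.2 < media
    · simp only [pass2, ih, h, if_true]
      rw [List.filter_cons_of_neg (by simp; omega)]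
      exact Prod.ext rfl (by push_cast [List.length_cons]; ring)
    · simp only [pass2, ih, h, if_false]
      rw [List.filter_cons_of_pos (by simp; omega)]
      exact Prod.ext rfl (by push_cast [List.length_cons]; ring)
  | nil => simp [pass2]

-- ===== VERDICT (by name: the statement is the Claim_ definition above) =====
theorem filtra_alunos_spec : Claim_equal_filtra_alunos := by
  intro alunos inscritos media _
  unfold Spec_filtra_alunos filtra_alunos filtra_alunos_alt
  rw [pass1_spec, pass2_spec]
  dsimp only
  rw [List.filter_filter]
  have heq :
      alunos.filter (fun a => decide (media ≤ a.2) && inscritos.contains a.1)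
        = alunos.filter (fun a => inscritos.contains a.1 && decide (media ≤ a.2)) :=
    List.filter_congr (fun a _ => Bool.and_comm _ _)
  rw [heq]
  ring
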